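-- pv_equiv track=rewrite | github.com/Xuan-cc/StrangeUtaGame | src/strange_uta_game/backend/infrastructure/parsers/inline_format.py | _split_ruby_groups
-- ===== SOURCE A (Python) =====
-- from typing import List, Optional, Tuple
--
-- def _split_ruby_groups(text: str) -> List[Tuple[str, str]]:
--     """将内联文本拆分为 ("ruby", content) 和 ("plain", content) 段。"""
--     result: List[Tuple[str, str]] = []
--     i = 0
--     while i < len(text):
--         if text[i] == "{":
--             # 找匹配的 }
--             end = text.index("}", i + 1)
--             result.append(("ruby", text[i + 1 : end]))
--             i = end + 1
--         else:
--             # 找下一个 { 或结尾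
--             next_brace = text.find("{", i)
--             if next_brace == -1:
--                 result.append(("plain", text[i:]))
--                 break
--             else:
--                 if next_brace > i:
--                     result.append(("plain", text[i:next_brace]))
--                 i = next_brace
--     return result
-- ===== SOURCE B (Python) =====
-- from typing import List, Tuple
--
-- def _split_ruby_groups(text: str) -> List[Tuple[str, str]]:
--     """Single-pass character state machine: buffer chars, flush on '{' / '}'."""
--     result: List[Tuple[str, str]] = []
--     buf: List[str] = []
--     in_ruby = False
--     for ch in text:
--         if in_ruby:
--             if ch == "}":
--                 result.append(("ruby", "".join(buf)))
--                 buf = []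
--                 in_ruby = False
--             else:
--                 buf.append(ch)
--         elif ch == "{":
--             if buf:
--                 result.append(("plain", "".join(buf)))
--                 buf = []
--             in_ruby = True
--         else:
--             buf.append(ch)
--     if in_ruby:
--         raise ValueError("unterminated ruby group")
--     if buf:
--         result.append(("plain", "".join(buf)))
--     return result
-- ===== Notes on version B (the rewrite author's own statement) =====
-- stated objective: alternative
-- what changed: Replaced A's index-jumping scan (repeated str.index/str.find with slicing) by a single pass over the characters with an explicit in_ruby state and a buffer that is flushed at each brace; Pre_ excludes inputs with an unclosed '{' on which both A and B raise ValueError.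
-- outside the precondition, e.g. on _split_ruby_groups('{'): A raises ValueError, B raises ValueError
import Mathlib
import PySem

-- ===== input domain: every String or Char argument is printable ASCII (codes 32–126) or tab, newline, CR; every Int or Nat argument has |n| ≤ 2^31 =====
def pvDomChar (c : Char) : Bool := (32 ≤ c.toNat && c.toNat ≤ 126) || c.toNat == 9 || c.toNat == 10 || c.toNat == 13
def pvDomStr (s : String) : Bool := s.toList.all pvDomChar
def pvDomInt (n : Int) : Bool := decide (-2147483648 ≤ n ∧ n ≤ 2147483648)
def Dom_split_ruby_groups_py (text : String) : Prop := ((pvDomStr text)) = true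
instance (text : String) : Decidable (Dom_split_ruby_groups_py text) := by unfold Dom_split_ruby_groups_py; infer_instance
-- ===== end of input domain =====

-- B replaces A's index-jumping scan (str.index/str.find + slicing) by a single-pass
-- state machine with a buffer; both raise ValueError on an unclosed '{' (outside Pre_).

-- ===== PORT A =====
-- termination helper for the plain branch: text.find("{", i) at a non-'{' char is > i
theorem pvAIdxPos {c : Char} {rest : List Char} {n : Nat} (hc : ¬ c = '{')
    (h : PySem.List.index? (c :: rest) '{' = some n) : 0 < n := by
  rw [PySem.List.index?_cons_of_ne _ hc] at h
  rcases PySem.List.index? rest '{' with _ | m <;> simp at h <;> omega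

-- the while loop of A over the remaining suffix of the text; index? = none means
-- Python's str.index / str.find found nothing (ValueError in the first case)
def pvALoop : List Char → List (String × String)
  | [] => []
  | c :: rest =>
    if c = '{' then
      -- end = text.index("}", i + 1)
      match PySem.List.index? rest '}' with
      | none => []   -- Python raises ValueError here (excluded by Pre_)
      | some e => ("ruby", String.ofList (rest.take e)) :: pvALoop (rest.drop (e + 1))
    else
      -- next_brace = text.find("{", i)
      match h : PySem.List.index? (c :: rest) '{' with
      | none => [("plain", String.ofList (c :: rest))]
      | some n => ("plain", String.ofList ((c :: rest).take n)) :: pvALoop ((c :: rest).drop n)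
  termination_by cs => cs.length
  decreasing_by
  · simp
  · have := pvAIdxPos (by assumption) h
    simp; omega

def split_ruby_groups_py (text : String) : List (String × String) := pvALoop text.toList

-- ===== PORT B =====
-- the for-loop of B: state = (result so far, buffer, in_ruby flag)
def pvBLoop (res : List (String × String)) (buf : List Char) (inRuby : Bool) :
    List Char → List (String × String)
  | [] =>
    if inRuby then res   -- Python raises ValueError here (excluded by Pre_)
    else if buf = [] then res else res ++ [("plain", String.ofList buf)]
  | c :: cs =>
    if inRuby then
      if c = '}' then pvBLoop (res ++ [("ruby", String.ofList buf)]) [] false cs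
      else pvBLoop res (buf ++ [c]) inRuby cs
    else if c = '{' then
      pvBLoop (if buf = [] then res else res ++ [("plain", String.ofList buf)]) [] true cs
    else pvBLoop res (buf ++ [c]) inRuby cs

def split_ruby_groups_py_alt (text : String) : List (String × String) :=
  pvBLoop [] [] false text.toList

-- ===== PRECONDITION & SPEC =====
-- Pre_ excludes exactly the inputs with a '{' that has no later '}': there both A
-- (text.index) and B (the in_ruby check after the loop) raise ValueError.
def Pre_split_ruby_groups_py (text : String) : Prop :=
  ∀ i < text.toList.length, text.toList[i]? = some '{' →
    ∃ j < text.toList.length, i < j ∧ text.toList[j]? = some '}'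
instance (text : String) : Decidable (Pre_split_ruby_groups_py text) := by
  unfold Pre_split_ruby_groups_py; infer_instance

def pvWitness_split_ruby_groups_py : String := "ab{cd}e{}"

def Spec_split_ruby_groups_py (text : String) (out : List (String × String)) : Prop :=
  out = split_ruby_groups_py_alt text
instance (text : String) (out : List (String × String)) :
    Decidable (Spec_split_ruby_groups_py text out) := by
  unfold Spec_split_ruby_groups_py; infer_instance

-- ===== CLAIM (what is proved, stated in full; the proofs are below) =====
def Claim_equal_split_ruby_groups_py : Prop :=
  ∀ (text : String), Dom_split_ruby_groups_py text → Pre_split_ruby_groups_py text →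
    Spec_split_ruby_groups_py text (split_ruby_groups_py text)

-- ===== LEMMAS AND PROOFS =====

-- proof-side form of the precondition: every '{' is followed by a later '}'
def pvPre' (cs : List Char) : Prop := ∀ p q, cs = p ++ '{' :: q → '}' ∈ q

theorem pvPre'_of_pre {cs : List Char}
    (h : ∀ i < cs.length, cs[i]? = some '{' → ∃ j < cs.length, i < j ∧ cs[j]? = some '}') :
    pvPre' cs := by
  intro p q hpq
  have hi : cs[p.length]? = some '{' := by subst hpq; simp
  have hlen : p.length < cs.length := by subst hpq; simp
  obtain ⟨j, hj, hij, hjv⟩ := h p.length hlen hi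
  have hdq : cs.drop (p.length + 1) = q := by subst hpq; simp
  have hq : q[j - (p.length + 1)]? = some '}' := by
    rw [← hdq, List.getElem?_drop]
    have : p.length + 1 + (j - (p.length + 1)) = j := by omega
    rw [this]; exact hjv
  exact List.mem_of_getElem? hq

theorem pvPre'_drop {cs : List Char} (h : pvPre' cs) (k : Nat) : pvPre' (cs.drop k) := by
  intro p q hpq
  exact h (cs.take k ++ p) q (by rw [List.append_assoc, ← hpq, List.take_append_drop])

-- accumulator lemma for B's loop
theorem pvBLoop_acc (cs : List Char) : ∀ (res : List (String × String)) (buf : List Char)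
    (r : Bool), pvBLoop res buf r cs = res ++ pvBLoop [] buf r cs := by
  induction cs with
  | nil => intro res buf r; simp only [pvBLoop]; split_ifs <;> simp
  | cons c cs ih =>
    intro res buf r
    simp only [pvBLoop]
    split_ifs <;>
      (conv_lhs => rw [ih]) <;>
      (conv_rhs => rw [ih]) <;>
      simp

-- in ruby mode, B consumes up to the first '}' as one ruby segment
theorem pvBLoop_ruby : ∀ (rest : List Char) (e : Nat), PySem.List.index? rest '}' = some e →
    ∀ (res : List (String × String)) (buf : List Char), pvBLoop res buf true rest =
      pvBLoop (res ++ [("ruby", String.ofList (buf ++ rest.take e))]) [] false (rest.drop (e + 1)) := by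
  intro rest
  induction rest with
  | nil => intro e h; rw [PySem.List.index?_eq_idxOf?] at h; simp [List.idxOf?] at h
  | cons c cs ih =>
    intro e h res buf
    by_cases hc : c = '}'
    · subst hc
      rw [PySem.List.index?_cons_self] at h
      injection h with h; subst h
      simp [pvBLoop]
    · rw [PySem.List.index?_cons_of_ne _ hc] at h
      rcases he : PySem.List.index? cs '}' with _ | e' <;> rw [he] at h <;> simp at h
      subst h
      have hbl : pvBLoop res buf true (c :: cs) = pvBLoop res (buf ++ [c]) true cs := by
        simp [pvBLoop, hc]
      rw [hbl, ih e' he]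
      simp [List.append_assoc]

-- in plain mode with no '{' left, B flushes the buffer and the rest as one plain segment
theorem pvBLoop_plain_none : ∀ (s : List Char), PySem.List.index? s '{' = none →
    ∀ (res : List (String × String)) (buf : List Char), pvBLoop res buf false s =
      if buf ++ s = [] then res else res ++ [("plain", String.ofList (buf ++ s))] := by
  intro s
  induction s with
  | nil => intro _ res buf; simp only [pvBLoop]; split_ifs <;> simp_all
  | cons c cs ih =>
    intro h res buf
    rw [PySem.List.index?_eq_none_iff _ _] at h
    have hc : c ≠ '{' := fun hc => h (by simp [hc])
    have h' : PySem.List.index? cs '{' = none :=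
      (PySem.List.index?_eq_none_iff _ _).mpr (fun hm => h (by simp [hm]))
    have hbl : pvBLoop res buf false (c :: cs) = pvBLoop res (buf ++ [c]) false cs := by
      simp [pvBLoop, hc]
    rw [hbl, ih h', List.append_assoc]
    simp

-- in plain mode, B emits the text up to the first '{' and switches to ruby mode
theorem pvBLoop_plain_until : ∀ (s : List Char) (n : Nat), PySem.List.index? s '{' = some n →
    ∀ (res : List (String × String)) (buf : List Char), pvBLoop res buf false s =
      pvBLoop (if buf ++ s.take n = [] then res else res ++ [("plain", String.ofList (buf ++ s.take n))])
        [] true (s.drop (n + 1)) := by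
  intro s
  induction s with
  | nil => intro n h; rw [PySem.List.index?_eq_idxOf?] at h; simp [List.idxOf?] at h
  | cons c cs ih =>
    intro n h res buf
    by_cases hc : c = '{'
    · subst hc
      rw [PySem.List.index?_cons_self] at h
      injection h with h; subst h
      simp only [pvBLoop, List.take_zero, List.append_nil, List.drop_succ_cons, List.drop_zero]
      split_ifs <;> simp_all
    · rw [PySem.List.index?_cons_of_ne _ hc] at h
      rcases he : PySem.List.index? cs '{' with _ | n' <;> rw [he] at h <;> simp at h
      subst h
      have hbl : pvBLoop res buf false (c :: cs) = pvBLoop res (buf ++ [c]) false cs := by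
        simp [pvBLoop, hc]
      rw [hbl, ih n' he]
      simp [List.append_assoc]

-- main equivalence on char lists, by strong recursion on the length of the suffix
theorem pvMain (s : List Char) (hpre : pvPre' s) : pvALoop s = pvBLoop [] [] false s := by
  match s with
  | [] => simp [pvALoop, pvBLoop]
  | c :: rest =>
    by_cases hc : c = '{'
    · subst hc
      have hmem : '}' ∈ rest := hpre [] rest rfl
      obtain ⟨e, he⟩ := Option.isSome_iff_exists.mp
        ((PySem.List.index?_isSome_iff rest '}').mpr hmem)
      have he' : List.idxOf? '}' rest = some e := by
        rw [PySem.List.index?_eq_idxOf?] at he; exact he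
      have hA : pvALoop ('{' :: rest) =
          ("ruby", String.ofList (rest.take e)) :: pvALoop (rest.drop (e + 1)) := by
        rw [pvALoop]; simp [he']
      have hB0 : pvBLoop [] [] false ('{' :: rest) = pvBLoop [] [] true rest := by
        simp [pvBLoop]
      have hrec : pvALoop (rest.drop (e + 1)) = pvBLoop [] [] false (rest.drop (e + 1)) :=
        pvMain (rest.drop (e + 1)) (by simpa using pvPre'_drop hpre (e + 2))
      rw [hA, hB0, pvBLoop_ruby rest e he, pvBLoop_acc, hrec]
      simp
    · rcases hn : PySem.List.index? (c :: rest) '{' with _ | n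
      · have hA : pvALoop (c :: rest) = [("plain", String.ofList (c :: rest))] := by
          rw [pvALoop]; simp only [if_neg hc]
          split
          · rfl
          · rename_i m heq
            rw [hn] at heq
            cases heq
        rw [hA, pvBLoop_plain_none _ hn]
        simp
      · have hpos : 0 < n := pvAIdxPos hc hn
        have hn' : List.idxOf? '{' (c :: rest) = some n := by
          rw [PySem.List.index?_eq_idxOf?] at hn; exact hn
        have hA : pvALoop (c :: rest) =
            ("plain", String.ofList ((c :: rest).take n)) :: pvALoop ((c :: rest).drop n) := by
          rw [pvALoop]; simp only [if_neg hc]; split <;> simp_all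
        obtain ⟨hlt, hget, -⟩ := PySem.List.getElem_of_index?_eq_some hn
        have hdrop : (c :: rest).drop n = '{' :: (c :: rest).drop (n + 1) := by
          rw [List.drop_eq_getElem_cons hlt, hget]
        have hB : pvBLoop [] [] false (c :: rest) =
            ("plain", String.ofList ((c :: rest).take n)) :: pvBLoop [] [] false ((c :: rest).drop n) := by
          rw [pvBLoop_plain_until _ n hn]
          have htk : (c :: rest).take n ≠ [] := by
            intro hnil; have := congrArg List.length hnil; simp at this; omega
          rw [if_neg (by simpa using htk)]
          have hsw : pvBLoop [] [] false ((c :: rest).drop n) =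
              pvBLoop [] [] true ((c :: rest).drop (n + 1)) := by
            rw [hdrop]; simp [pvBLoop]
          rw [pvBLoop_acc, hsw]
          simp
        have hrec : pvALoop ((c :: rest).drop n) = pvBLoop [] [] false ((c :: rest).drop n) :=
          pvMain ((c :: rest).drop n) (pvPre'_drop hpre n)
        rw [hA, hB, hrec]
  termination_by s.length
  decreasing_by
  · simp
  · simp; omega

-- ===== VERDICT (by name: the statement is the Claim_ definition above) =====
theorem split_ruby_groups_py_spec : Claim_equal_split_ruby_groups_py := by
  intro text _ hpre
  unfold Spec_split_ruby_groups_py split_ruby_groups_py split_ruby_groups_py_alt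
  exact pvMain text.toList (pvPre'_of_pre hpre)
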